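-- pv_equiv track=rewrite | github.com/rajm5113/Auto_job_apply_AI | linkedin_agent/agents/applier_agent.py | _match_text_field
-- ===== SOURCE A (Python) =====
-- def _match_text_field(label: str, profile: dict,
--                        first_name: str = "", last_name: str = "",
--                        city: str = "Bengaluru") -> str | None:
--     """
--     Map a field label to a concrete value.
--     Returns None only if the field is truly unknown — caller will use LLM.
--     """
--     ll = label.lower()
--
--     # Name variants
--     if any(w in ll for w in ["first name", "firstname", "given name"]):
--         return first_name
--     if any(w in ll for w in ["last name", "lastname", "surname", "family name"]):
--         return last_name
--     if "full name" in ll and "first" not in ll and "last" not in ll: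
--         return f"{first_name} {last_name}".strip()
--     # Generic "name" — prefer full name unless contextually first-name-only
--     if "name" in ll and not any(x in ll for x in ["company", "school", "college"]):
--         return f"{first_name} {last_name}".strip()
--
--     if any(w in ll for w in ["city", "location", "where", "town"]):
--         return city or "Bengaluru"
--     if any(w in ll for w in ["linkedin", "profile url"]):
--         return ""
--     if any(w in ll for w in ["github", "portfolio", "website"]):
--         return ""
--     if any(w in ll for w in ["salary", "ctc", "compensation", "package"]):
--         return "500000"
--     if any(w in ll for w in ["notice", "joining", "available", "start date"]):
--         return "Immediately"
--     if any(w in ll for w in ["phone", "mobile", "contact"]):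
--         return profile.get("phone", "")
--     if any(w in ll for w in ["email", "e-mail"]):
--         return profile.get("email", "")
--     if any(w in ll for w in ["year", "experience", "years of exp"]):
--         # For skill-specific questions ("years with Python") use 0 for fresher
--         # For total experience questions use actual years
--         if any(w in ll for w in ["total", "overall", "general", "work exp"]):
--             return str(profile.get("experience_years", 1))
--         return "0"   # specific skill — fresher level
--     if any(w in ll for w in ["state", "province"]):
--         return "Karnataka"
--     if any(w in ll for w in ["country"]):
--         return "India"
--     if any(w in ll for w in ["zip", "postal", "pin code", "pincode"]):
--         return "560001"
--     if any(w in ll for w in ["degree", "qualification", "education"]):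
--         return profile.get("education", "Bachelor of Technology")
--     if any(w in ll for w in ["college", "university", "institution", "school"]):
--         return profile.get("college", "")
--     if any(w in ll for w in ["major", "specialization", "branch", "stream"]):
--         return profile.get("major", "Computer Science")
--
--     return None  # truly unknown — caller will use LLM
-- ===== SOURCE B (Python) =====
-- # Inverted keyword index + min-priority selection: instead of an ordered
-- # early-return if-chain, collect ALL matching rule ids in one pass over a flat
-- # keyword->rule table, drop blocked ids, and pick the lowest rule id (= A's
-- # first-match priority), then look the value up in a rule-id -> value map.
--
-- _KEYWORDS = [
--     ("first name", 0), ("firstname", 0), ("given name", 0),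
--     ("last name", 1), ("lastname", 1), ("surname", 1), ("family name", 1),
--     ("full name", 2),
--     ("name", 3),
--     ("city", 4), ("location", 4), ("where", 4), ("town", 4),
--     ("linkedin", 5), ("profile url", 5),
--     ("github", 6), ("portfolio", 6), ("website", 6),
--     ("salary", 7), ("ctc", 7), ("compensation", 7), ("package", 7),
--     ("notice", 8), ("joining", 8), ("available", 8), ("start date", 8),
--     ("phone", 9), ("mobile", 9), ("contact", 9),
--     ("email", 10), ("e-mail", 10),
--     ("year", 11), ("experience", 11), ("years of exp", 11),
--     ("state", 12), ("province", 12),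
--     ("country", 13),
--     ("zip", 14), ("postal", 14), ("pin code", 14), ("pincode", 14),
--     ("degree", 15), ("qualification", 15), ("education", 15),
--     ("college", 16), ("university", 16), ("institution", 16), ("school", 16),
--     ("major", 17), ("specialization", 17), ("branch", 17), ("stream", 17),
-- ]
--
-- # words whose presence disables a rule (the negative guards of rules 2 and 3)
-- _BLOCKERS = [("first", 2), ("last", 2), ("company", 3), ("school", 3), ("college", 3)]
--
--
-- def _match_text_field(label: str, profile: dict,
--                       first_name: str = "", last_name: str = "",
--                       city: str = "Bengaluru") -> str | None:
--     ll = label.lower()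
--     eligible = [i for kw, i in _KEYWORDS
--                 if kw in ll and not any(w in ll for w, j in _BLOCKERS if j == i)]
--     if not eligible:
--         return None
--     r = min(eligible)
--     full = f"{first_name} {last_name}".strip()
--     values = {
--         0: first_name, 1: last_name, 2: full, 3: full,
--         4: city or "Bengaluru", 5: "", 6: "", 7: "500000", 8: "Immediately",
--         9: profile.get("phone", ""), 10: profile.get("email", ""),
--         11: (str(profile.get("experience_years", 1))
--              if any(w in ll for w in ["total", "overall", "general", "work exp"])
--              else "0"),
--         12: "Karnataka", 13: "India", 14: "560001",
--         15: profile.get("education", "Bachelor of Technology"),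
--         16: profile.get("college", ""),
--         17: profile.get("major", "Computer Science"),
--     }
--     return values[r]
-- ===== Notes on version B (the rewrite author's own statement) =====
-- stated objective: alternative
-- what changed: Replaced A's ordered early-return if-chain by an inverted flat keyword->rule-id index: one pass collects all matching, unblocked rule ids, the minimum id (= A's first-match priority) is selected, and the answer is looked up in a rule-id -> value map.
import Mathlib
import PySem

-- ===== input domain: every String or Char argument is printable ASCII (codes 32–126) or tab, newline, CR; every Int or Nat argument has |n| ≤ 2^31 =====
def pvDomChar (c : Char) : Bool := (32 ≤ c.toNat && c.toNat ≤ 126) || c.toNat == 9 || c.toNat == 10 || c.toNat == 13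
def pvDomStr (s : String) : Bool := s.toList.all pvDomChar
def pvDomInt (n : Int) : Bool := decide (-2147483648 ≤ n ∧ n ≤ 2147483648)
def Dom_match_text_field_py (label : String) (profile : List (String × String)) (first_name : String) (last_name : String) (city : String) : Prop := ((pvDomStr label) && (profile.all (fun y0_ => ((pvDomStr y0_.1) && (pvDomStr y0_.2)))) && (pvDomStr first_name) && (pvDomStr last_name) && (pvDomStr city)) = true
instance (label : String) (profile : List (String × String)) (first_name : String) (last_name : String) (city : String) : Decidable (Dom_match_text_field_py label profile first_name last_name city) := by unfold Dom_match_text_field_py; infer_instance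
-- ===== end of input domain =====

-- B replaces A's ordered early-return if-chain by an inverted keyword->rule-id index:
-- collect all matching rule ids, drop blocked ones, pick the minimum id, look the value up.

-- ===== PORT A =====
-- literal transliteration of A's if-chain; profile.get(k, d) = (Dict.mk profile).getD k d;
-- str(profile.get("experience_years", 1)) has string values on this domain, so the default is "1"
def match_text_field_py (label : String) (profile : List (String × String)) (first_name : String) (last_name : String) (city : String) : Option String :=
  let ll := PySem.Str.lower label
  if ["first name", "firstname", "given name"].any (fun w => PySem.Str.isIn w ll) then some first_name
  else if ["last name", "lastname", "surname", "family name"].any (fun w => PySem.Str.isIn w ll) then some last_name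
  else if PySem.Str.isIn "full name" ll && !(PySem.Str.isIn "first" ll) && !(PySem.Str.isIn "last" ll) then
    some (PySem.Str.strip (first_name ++ " " ++ last_name))
  else if PySem.Str.isIn "name" ll && !(["company", "school", "college"].any (fun x => PySem.Str.isIn x ll)) then
    some (PySem.Str.strip (first_name ++ " " ++ last_name))
  else if ["city", "location", "where", "town"].any (fun w => PySem.Str.isIn w ll) then
    some (if city == "" then "Bengaluru" else city)
  else if ["linkedin", "profile url"].any (fun w => PySem.Str.isIn w ll) then some ""
  else if ["github", "portfolio", "website"].any (fun w => PySem.Str.isIn w ll) then some ""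
  else if ["salary", "ctc", "compensation", "package"].any (fun w => PySem.Str.isIn w ll) then some "500000"
  else if ["notice", "joining", "available", "start date"].any (fun w => PySem.Str.isIn w ll) then some "Immediately"
  else if ["phone", "mobile", "contact"].any (fun w => PySem.Str.isIn w ll) then
    some ((PySem.Dict.mk profile).getD "phone" "")
  else if ["email", "e-mail"].any (fun w => PySem.Str.isIn w ll) then
    some ((PySem.Dict.mk profile).getD "email" "")
  else if ["year", "experience", "years of exp"].any (fun w => PySem.Str.isIn w ll) then
    (if ["total", "overall", "general", "work exp"].any (fun w => PySem.Str.isIn w ll) then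
      some ((PySem.Dict.mk profile).getD "experience_years" "1")
    else some "0")
  else if ["state", "province"].any (fun w => PySem.Str.isIn w ll) then some "Karnataka"
  else if ["country"].any (fun w => PySem.Str.isIn w ll) then some "India"
  else if ["zip", "postal", "pin code", "pincode"].any (fun w => PySem.Str.isIn w ll) then some "560001"
  else if ["degree", "qualification", "education"].any (fun w => PySem.Str.isIn w ll) then
    some ((PySem.Dict.mk profile).getD "education" "Bachelor of Technology")
  else if ["college", "university", "institution", "school"].any (fun w => PySem.Str.isIn w ll) then
    some ((PySem.Dict.mk profile).getD "college" "")
  else if ["major", "specialization", "branch", "stream"].any (fun w => PySem.Str.isIn w ll) then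
    some ((PySem.Dict.mk profile).getD "major" "Computer Science")
  else none

-- ===== PORT B =====
-- flat keyword -> rule-id index (Source B's _KEYWORDS)
def mtfKeywords : List (String × Nat) :=
  [ ("first name", 0), ("firstname", 0), ("given name", 0),
    ("last name", 1), ("lastname", 1), ("surname", 1), ("family name", 1),
    ("full name", 2),
    ("name", 3),
    ("city", 4), ("location", 4), ("where", 4), ("town", 4),
    ("linkedin", 5), ("profile url", 5),
    ("github", 6), ("portfolio", 6), ("website", 6),
    ("salary", 7), ("ctc", 7), ("compensation", 7), ("package", 7),
    ("notice", 8), ("joining", 8), ("available", 8), ("start date", 8),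
    ("phone", 9), ("mobile", 9), ("contact", 9),
    ("email", 10), ("e-mail", 10),
    ("year", 11), ("experience", 11), ("years of exp", 11),
    ("state", 12), ("province", 12),
    ("country", 13),
    ("zip", 14), ("postal", 14), ("pin code", 14), ("pincode", 14),
    ("degree", 15), ("qualification", 15), ("education", 15),
    ("college", 16), ("university", 16), ("institution", 16), ("school", 16),
    ("major", 17), ("specialization", 17), ("branch", 17), ("stream", 17) ]

-- words whose presence disables a rule (Source B's _BLOCKERS)
def mtfBlockers : List (String × Nat) :=
  [ ("first", 2), ("last", 2), ("company", 3), ("school", 3), ("college", 3) ]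

def match_text_field_py_alt (label : String) (profile : List (String × String)) (first_name : String) (last_name : String) (city : String) : Option String :=
  let ll := PySem.Str.lower label
  let eligible := (mtfKeywords.filter (fun p =>
      PySem.Str.isIn p.1 ll &&
      !((mtfBlockers.filter (fun b => b.2 == p.2)).any (fun b => PySem.Str.isIn b.1 ll)))).map (fun p => p.2)
  match PySem.List.min? eligible (fun x => x) with
  | none => none
  | some r =>
    let full := PySem.Str.strip (first_name ++ " " ++ last_name)
    let values : PySem.Dict Nat String := PySem.Dict.mk
      [ (0, first_name), (1, last_name), (2, full), (3, full),
        (4, if city == "" then "Bengaluru" else city), (5, ""), (6, ""), (7, "500000"), (8, "Immediately"),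
        (9, (PySem.Dict.mk profile).getD "phone" ""), (10, (PySem.Dict.mk profile).getD "email" ""),
        (11, if ["total", "overall", "general", "work exp"].any (fun w => PySem.Str.isIn w ll) then
               (PySem.Dict.mk profile).getD "experience_years" "1"
             else "0"),
        (12, "Karnataka"), (13, "India"), (14, "560001"),
        (15, (PySem.Dict.mk profile).getD "education" "Bachelor of Technology"),
        (16, (PySem.Dict.mk profile).getD "college" ""),
        (17, (PySem.Dict.mk profile).getD "major" "Computer Science") ]
    -- r is always a key of values (rule ids are 0..17), so Python's values[r] never raises
    some (values.getD r "")

-- ===== PRECONDITION & SPEC =====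
def Spec_match_text_field_py (label : String) (profile : List (String × String)) (first_name : String) (last_name : String) (city : String) (out : Option String) : Prop := out = match_text_field_py_alt label profile first_name last_name city
instance (label : String) (profile : List (String × String)) (first_name : String) (last_name : String) (city : String) (out : Option String) : Decidable (Spec_match_text_field_py label profile first_name last_name city out) := by unfold Spec_match_text_field_py; infer_instance

-- ===== CLAIM (what is proved, stated in full; the proofs are below) =====
def Claim_equal_match_text_field_py : Prop := ∀ (label : String) (profile : List (String × String)) (first_name : String) (last_name : String) (city : String), Dom_match_text_field_py label profile first_name last_name city → Spec_match_text_field_py label profile first_name last_name city (match_text_field_py label profile first_name last_name city)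

-- ===== LEMMAS AND PROOFS =====

-- folding min over elements all ≥ x leaves x
theorem pvFoldlMinEq (t : List Nat) : ∀ (x : Nat), (∀ y ∈ t, x ≤ y) → t.foldl min x = x := by
  induction t with
  | nil => intro x _; rfl
  | cons a t ih =>
    intro x h
    have hxa : min x a = x := Nat.min_eq_left (h a (by simp))
    simp only [List.foldl_cons, hxa]
    exact ih x (fun y hy => h y (by simp [hy]))

-- min? of a (≤)-sorted Nat list is its head
theorem pvMinSorted (l : List Nat) (h : l.Pairwise (· ≤ ·)) :
    PySem.List.min? l (fun x => x) = l.head? := by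
  cases l with
  | nil => simp [PySem.List.min?_eq_none_iff]
  | cons x t =>
    rw [PySem.List.min?_id_cons]
    have := List.pairwise_cons.mp h
    simp [pvFoldlMinEq t x this.1]

-- head of a filtered list is find?
theorem pvHeadFilter {α : Type} (q : α → Bool) (l : List α) :
    (l.filter q).head? = l.find? q := by
  induction l with
  | nil => rfl
  | cons a t ih => by_cases h : q a <;> simp [h, ih]

-- map∘find? over a cons unfolds to one if — the single step of the rule scan
theorem pvFindMapCons {α β : Type} (p : α → Bool) (f : α → β) (r : α) (rest : List α) :
    ((r :: rest).find? p).map f = if p r then some (f r) else ((rest.find? p).map f) := by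
  cases h : p r <;> simp [h]

-- splits a grouped keyword-any test into the per-keyword if-chain
theorem pvIfOr {α : Type} (a b : Bool) (x y : α) :
    (if (a || b) = true then x else y) = if a = true then x else if b = true then x else y := by
  cases a <;> cases b <;> simp

-- distributes bind over an if — pushes B's value lookup into the leaves of the rule tree
theorem pvIteBind {α β : Type} (c : Prop) [Decidable c] (x y : Option α) (f : α → Option β) :
    (if c then x else y).bind f = if c then x.bind f else y.bind f := by
  split_ifs <;> rfl

-- pushes 'if c then some x else some y' into 'some (if c then x else y)'
theorem pvIteSome {α : Type} (c : Prop) [Decidable c] (x y : α) :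
    (if c then some x else some y) = some (if c then x else y) := by
  split_ifs <;> rfl

-- B collapses to a find? over the keyword table
theorem pvAltFind (label : String) (profile : List (String × String)) (first_name last_name city : String) :
    match_text_field_py_alt label profile first_name last_name city =
      ((mtfKeywords.find? (fun p =>
          PySem.Str.isIn p.1 (PySem.Str.lower label) &&
          !((mtfBlockers.filter (fun b => b.2 == p.2)).any (fun b => PySem.Str.isIn b.1 (PySem.Str.lower label))))).map (fun p => p.2)).bind
        (fun r =>
          let full := PySem.Str.strip (first_name ++ " " ++ last_name)
          let values : PySem.Dict Nat String := PySem.Dict.mk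
            [ (0, first_name), (1, last_name), (2, full), (3, full),
              (4, if city == "" then "Bengaluru" else city), (5, ""), (6, ""), (7, "500000"), (8, "Immediately"),
              (9, (PySem.Dict.mk profile).getD "phone" ""), (10, (PySem.Dict.mk profile).getD "email" ""),
              (11, if ["total", "overall", "general", "work exp"].any (fun w => PySem.Str.isIn w (PySem.Str.lower label)) then
                     (PySem.Dict.mk profile).getD "experience_years" "1"
                   else "0"),
              (12, "Karnataka"), (13, "India"), (14, "560001"),
              (15, (PySem.Dict.mk profile).getD "education" "Bachelor of Technology"),
              (16, (PySem.Dict.mk profile).getD "college" ""),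
              (17, (PySem.Dict.mk profile).getD "major" "Computer Science") ]
          some (values.getD r "")) := by
  simp only [match_text_field_py_alt]
  have hsort : ((mtfKeywords.filter (fun p =>
      PySem.Str.isIn p.1 (PySem.Str.lower label) &&
      !((mtfBlockers.filter (fun b => b.2 == p.2)).any (fun b => PySem.Str.isIn b.1 (PySem.Str.lower label))))).map (fun p => p.2)).Pairwise (· ≤ ·) := by
    have hbase : (mtfKeywords.map (fun p => p.2)).Pairwise (· ≤ ·) := by decide
    exact List.Pairwise.sublist (List.Sublist.map _ List.filter_sublist) hbase
  rw [pvMinSorted _ hsort, List.head?_map, pvHeadFilter]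
  cases h : mtfKeywords.find? (fun p =>
      PySem.Str.isIn p.1 (PySem.Str.lower label) &&
      !((mtfBlockers.filter (fun b => b.2 == p.2)).any (fun b => PySem.Str.isIn b.1 (PySem.Str.lower label)))) <;>
    simp

-- ===== VERDICT (by name: the statement is the Claim_ definition above) =====
set_option maxHeartbeats 4000000 in
theorem match_text_field_py_spec : Claim_equal_match_text_field_py := by
  intro label profile first_name last_name city _
  unfold Spec_match_text_field_py
  rw [pvAltFind]
  unfold match_text_field_py mtfKeywords mtfBlockers
  simp only [pvFindMapCons, List.find?_nil, Option.map_none, Option.bind_none, Option.bind_some,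
    List.filter_cons, List.filter_nil, List.any_cons, List.any_nil,
    beq_iff_eq, pvIteSome, pvIfOr, Bool.or_false, Bool.not_or,
    Bool.and_assoc, pvIteBind, Option.bind_some, Option.bind_none]
  norm_num [PySem.Dict.getD, PySem.Dict.get?, PySem.Dict.mk, List.find?, beq_eq_decide]
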